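-- pv_equiv track=rewrite | github.com/rahulc0dy/Advent-of-Code-Solutions | 2024/AOC Day 16/part2.py | collect_optimal_tiles
-- ===== SOURCE A (Python) =====
-- def collect_optimal_tiles(pred, goal_states):
--     visited = set()
--     stack = list(goal_states)
--     while stack:
--         state = stack.pop()
--         if state in visited:
--             continue
--         visited.add(state)
--         for pstate in pred.get(state, []):
--             if pstate not in visited:
--                 stack.append(pstate)
--     tiles = {(r, c) for (r, c, d) in visited}
--     return tiles
-- ===== SOURCE B (Python) =====
-- def collect_optimal_tiles(pred, goal_states):
--     visited = set()
--
--     def visit(state):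
--         if state in visited:
--             return
--         visited.add(state)
--         for pstate in reversed(pred.get(state, ())):
--             visit(pstate)
--
--     # visit goals last-first; the predecessors are recursed into in reverse
--     # order so states are discovered in the same order as the worklist
--     # version (the returned set does not depend on that order anyway)
--     for goal in reversed(goal_states):
--         visit(goal)
--     return {(r, c) for (r, c, d) in visited}
-- ===== Notes on version B (the rewrite author's own statement) =====
-- stated objective: alternative
-- what changed: Replaces the explicit worklist (a while-loop popping a stack whose pushes are filtered against visited) by a recursive DFS helper visit(state) that checks visited at entry and recurses into each predecessor, sharing one visited set; its Lean port is a fuel-guarded structural recursion instead of A's well-founded stack loop.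
import Mathlib
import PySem

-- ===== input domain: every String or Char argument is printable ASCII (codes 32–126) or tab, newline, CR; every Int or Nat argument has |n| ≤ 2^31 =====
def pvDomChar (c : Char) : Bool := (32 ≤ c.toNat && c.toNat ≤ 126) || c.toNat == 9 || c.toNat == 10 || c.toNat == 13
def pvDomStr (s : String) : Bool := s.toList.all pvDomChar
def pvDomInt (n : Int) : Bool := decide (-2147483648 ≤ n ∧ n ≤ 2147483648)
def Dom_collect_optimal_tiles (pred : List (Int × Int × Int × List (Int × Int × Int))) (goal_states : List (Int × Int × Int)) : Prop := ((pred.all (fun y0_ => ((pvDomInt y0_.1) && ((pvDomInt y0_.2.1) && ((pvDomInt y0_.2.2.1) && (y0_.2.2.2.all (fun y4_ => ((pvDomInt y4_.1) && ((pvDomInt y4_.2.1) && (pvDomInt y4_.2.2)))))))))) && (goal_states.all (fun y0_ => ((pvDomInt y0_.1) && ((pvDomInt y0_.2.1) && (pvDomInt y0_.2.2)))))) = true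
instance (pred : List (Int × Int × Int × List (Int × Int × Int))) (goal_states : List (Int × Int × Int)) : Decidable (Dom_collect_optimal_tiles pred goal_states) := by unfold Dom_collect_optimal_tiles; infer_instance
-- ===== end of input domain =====

-- B replaces A's explicit worklist loop (stack with a push-time visited filter) by a
-- recursive DFS helper sharing one visited set; same returned tile set (objective: alternative).

-- ===== PORT A =====
-- Termination-measure helpers cited by name in pvLoopA's decreasing_by.
def pvKeys (pred : List (Int × Int × Int × List (Int × Int × Int))) : List (Int × Int × Int) :=
  pred.map (fun kv => (kv.1, kv.2.1, kv.2.2.1))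

def pvUnvisited (pred : List (Int × Int × Int × List (Int × Int × Int))) (v : List (Int × Int × Int)) : Nat :=
  (pvKeys pred).countP (fun x => decide (¬ x ∈ v))

theorem pvCountP_le {α : Type} (l : List α) (p q : α → Bool) (h : ∀ x, q x = true → p x = true) :
    l.countP q ≤ l.countP p := by
  induction l with
  | nil => simp
  | cons a l ih =>
    simp only [List.countP_cons]
    by_cases hq : q a = true
    · simp [hq, h a hq]; omega
    · simp only [Bool.not_eq_true] at hq
      simp [hq]; split <;> omega

theorem pvCountP_lt {α : Type} (l : List α) (p q : α → Bool) (h : ∀ x, q x = true → p x = true)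
    (x : α) (hx : x ∈ l) (hp : p x = true) (hq : q x = false) : l.countP q < l.countP p := by
  induction l with
  | nil => simp at hx
  | cons a l ih =>
    simp only [List.countP_cons]
    rcases List.mem_cons.mp hx with rfl | hmem
    · have h1 : l.countP q ≤ l.countP p := pvCountP_le l p q h
      simp [hp, hq]; omega
    · have h1 := ih hmem
      by_cases hqa : q a = true
      · simp [hqa, h a hqa]; omega
      · simp only [Bool.not_eq_true] at hqa
        simp [hqa]; split <;> omega

theorem pvUnvisited_add_lt (pred : List (Int × Int × Int × List (Int × Int × Int)))
    {v : List (Int × Int × Int)} {s : Int × Int × Int}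
    (hs : s ∈ pvKeys pred) (hv : s ∉ v) :
    pvUnvisited pred (PySem.Set.add v s) < pvUnvisited pred v := by
  refine pvCountP_lt _ _ _ (fun x hx => ?_) s hs (by simpa using hv) ?_
  · simp only [decide_eq_true_eq] at hx ⊢
    exact fun hmem => hx ((PySem.Set.mem_add _ _ _).mpr (Or.inl hmem))
  · simp [PySem.Set.mem_add]

theorem pvUnvisited_add_eq (pred : List (Int × Int × Int × List (Int × Int × Int)))
    {v : List (Int × Int × Int)} {s : Int × Int × Int} (hs : s ∉ pvKeys pred) :
    pvUnvisited pred (PySem.Set.add v s) = pvUnvisited pred v := by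
  unfold pvUnvisited
  refine List.countP_congr (fun x hx => ?_)
  have hxs : x ≠ s := fun h => hs (h ▸ hx)
  simp [PySem.Set.mem_add, hxs]

-- pred.get(state, []): lookup in the association list representing the dict (unique keys).
def pvGetPredsA (pred : List (Int × Int × Int × List (Int × Int × Int))) (s : Int × Int × Int) : List (Int × Int × Int) :=
  match pred.find? (fun kv => (kv.1, kv.2.1, kv.2.2.1) == s) with
  | some kv => kv.2.2.2
  | none => []

theorem pvGetPredsA_eq_nil (pred : List (Int × Int × Int × List (Int × Int × Int)))
    {s : Int × Int × Int} (hs : s ∉ pvKeys pred) : pvGetPredsA pred s = [] := by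
  unfold pvGetPredsA
  have : pred.find? (fun kv => (kv.1, kv.2.1, kv.2.2.1) == s) = none := by
    refine List.find?_eq_none.mpr (fun kv hkv => ?_)
    simp only [beq_iff_eq]
    exact fun h => hs (h ▸ List.mem_map_of_mem hkv)
  rw [this]

-- the while-loop on the explicit stack; the stack is kept TOP-FIRST (Python appends to and
-- pops from the END of the list, so push = cons of the reversed batch, pop = head).
def pvLoopA (pred : List (Int × Int × Int × List (Int × Int × Int)))
    (visited : PySem.Set (Int × Int × Int)) (stack : List (Int × Int × Int)) :
    PySem.Set (Int × Int × Int) :=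
  match stack with
  | [] => visited
  | state :: rest =>
    if h : state ∈ visited then pvLoopA pred visited rest
    else
      pvLoopA pred (PySem.Set.add visited state)
        (((pvGetPredsA pred state).filter
            (fun p => decide (¬ p ∈ PySem.Set.add visited state))).reverse ++ rest)
termination_by (pvUnvisited pred visited, stack.length)
decreasing_by
  · exact Prod.Lex.right _ (Nat.lt_succ_self _)
  · by_cases hk : state ∈ pvKeys pred
    · exact Prod.Lex.left _ _ (pvUnvisited_add_lt pred hk h)
    · rw [pvUnvisited_add_eq pred hk, pvGetPredsA_eq_nil pred hk]
      exact Prod.Lex.right _ (by simp)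

-- Python's set-iteration order is hash-based and not modelled; the returned set is compared
-- as a finite set, so the comprehension is iterated in visited's insertion order.
def collect_optimal_tiles (pred : List (Int × Int × Int × List (Int × Int × Int))) (goal_states : List (Int × Int × Int)) : List (Int × Int) :=
  let visited := pvLoopA pred PySem.Set.empty goal_states.reverse
  PySem.Set.ofList (visited.map (fun s => (s.1, s.2.1)))

-- ===== PORT B =====
def pvGetPredsB (pred : List (Int × Int × Int × List (Int × Int × Int))) (s : Int × Int × Int) : List (Int × Int × Int) :=
  ((pred.find? (fun kv => (kv.1, kv.2.1, kv.2.2.1) == s)).map (fun kv => kv.2.2.2)).getD []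

-- the recursive helper 'visit': check visited at entry, otherwise add the state and recurse
-- into each predecessor (reversed order). The Nat argument is FUEL, a pure totality guard for
-- Python's unbounded recursion: pred.length + 1 always suffices (each level of nesting marks
-- a fresh key of pred as visited), so it never changes the computed value.
def pvVisitF (pred : List (Int × Int × Int × List (Int × Int × Int))) :
    Nat → (Int × Int × Int) → PySem.Set (Int × Int × Int) → PySem.Set (Int × Int × Int)
  | 0, _, v => v
  | Nat.succ n, s, v =>
    if s ∈ v then v
    else ((pvGetPredsB pred s).reverse).foldl (fun acc p => pvVisitF pred n p acc) (PySem.Set.add v s)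

def collect_optimal_tiles_alt (pred : List (Int × Int × Int × List (Int × Int × Int))) (goal_states : List (Int × Int × Int)) : List (Int × Int) :=
  let visited := goal_states.reverse.foldl
    (fun v g => pvVisitF pred (pred.length + 1) g v) PySem.Set.empty
  PySem.Set.ofList (visited.map (fun s => (s.1, s.2.1)))

-- ===== PRECONDITION & SPEC =====
def Spec_collect_optimal_tiles (pred : List (Int × Int × Int × List (Int × Int × Int))) (goal_states : List (Int × Int × Int)) (out : List (Int × Int)) : Prop := out = collect_optimal_tiles_alt pred goal_states
instance (pred : List (Int × Int × Int × List (Int × Int × Int))) (goal_states : List (Int × Int × Int)) (out : List (Int × Int)) : Decidable (Spec_collect_optimal_tiles pred goal_states out) := by unfold Spec_collect_optimal_tiles; infer_instance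

-- ===== CLAIM (what is proved, stated in full; the proofs are below) =====
def Claim_equal_collect_optimal_tiles : Prop := ∀ (pred : List (Int × Int × Int × List (Int × Int × Int))) (goal_states : List (Int × Int × Int)), Dom_collect_optimal_tiles pred goal_states → Spec_collect_optimal_tiles pred goal_states (collect_optimal_tiles pred goal_states)

-- ===== LEMMAS AND PROOFS =====

theorem pvGetPredsB_eq_A (pred : List (Int × Int × Int × List (Int × Int × Int))) (s : Int × Int × Int) :
    pvGetPredsB pred s = pvGetPredsA pred s := by
  unfold pvGetPredsB pvGetPredsA
  cases pred.find? (fun kv => (kv.1, kv.2.1, kv.2.2.1) == s) <;> rfl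

theorem pvUnvisited_mono (pred : List (Int × Int × Int × List (Int × Int × Int)))
    {v w : List (Int × Int × Int)} (h : ∀ x, x ∈ v → x ∈ w) :
    pvUnvisited pred w ≤ pvUnvisited pred v := by
  refine pvCountP_le _ _ _ (fun x hx => ?_)
  simp only [decide_eq_true_eq] at hx ⊢
  exact fun hv => hx (h x hv)

-- membership is preserved by visit (the visited set only grows)
theorem pvVisitF_mono (pred : List (Int × Int × Int × List (Int × Int × Int))) :
    ∀ (n : Nat) (s : Int × Int × Int) (v : PySem.Set (Int × Int × Int)) (x : Int × Int × Int),
      x ∈ v → x ∈ pvVisitF pred n s v := by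
  intro n
  induction n with
  | zero => intro s v x h; simpa [pvVisitF] using h
  | succ n ih =>
    intro s v x h
    rw [pvVisitF]
    by_cases hs : s ∈ v
    · simpa [hs] using h
    · simp only [hs, if_false]
      have hx : x ∈ PySem.Set.add v s := (PySem.Set.mem_add _ _ _).mpr (Or.inl h)
      generalize (PySem.Set.add v s) = w at hx
      induction ((pvGetPredsB pred s).reverse) generalizing w with
      | nil => simpa using hx
      | cons p l ihl => exact ihl (pvVisitF pred n p w) (ih p w x hx)

theorem pvVisitF_skip (pred : List (Int × Int × Int × List (Int × Int × Int)))
    {n : Nat} {s : Int × Int × Int} {v : PySem.Set (Int × Int × Int)}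
    (hn : 0 < n) (hs : s ∈ v) : pvVisitF pred n s v = v := by
  cases n with
  | zero => omega
  | succ n => rw [pvVisitF]; simp [hs]

-- with adequate fuel, the fuel value is irrelevant
theorem pvVisitF_fuel (pred : List (Int × Int × Int × List (Int × Int × Int))) :
    ∀ (n m : Nat) (s : Int × Int × Int) (v : PySem.Set (Int × Int × Int)),
      pvUnvisited pred v < n → pvUnvisited pred v < m →
      pvVisitF pred n s v = pvVisitF pred m s v := by
  intro n
  induction n with
  | zero => intro m s v hn _; omega
  | succ n ih =>
    intro m s v hn hm
    cases m with
    | zero => omega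
    | succ m =>
      rw [pvVisitF, pvVisitF]
      by_cases hs : s ∈ v
      · simp [hs]
      · simp only [hs, if_false]
        by_cases hk : s ∈ pvKeys pred
        · have hadd : pvUnvisited pred (PySem.Set.add v s) < pvUnvisited pred v :=
            pvUnvisited_add_lt pred hk hs
          have hn' : pvUnvisited pred (PySem.Set.add v s) < n := by omega
          have hm' : pvUnvisited pred (PySem.Set.add v s) < m := by omega
          generalize (PySem.Set.add v s) = w at hn' hm'
          induction ((pvGetPredsB pred s).reverse) generalizing w with
          | nil => rfl
          | cons p l ihl =>
            simp only [List.foldl_cons]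
            rw [ih m p w hn' hm']
            have hsub : ∀ x, x ∈ w → x ∈ pvVisitF pred m p w := pvVisitF_mono pred m p w
            have hle : pvUnvisited pred (pvVisitF pred m p w) ≤ pvUnvisited pred w :=
              pvUnvisited_mono pred hsub
            exact ihl (pvVisitF pred m p w) (by omega) (by omega)
        · rw [pvGetPredsB_eq_A, pvGetPredsA_eq_nil pred hk]; rfl

theorem pvSeq_fuel (pred : List (Int × Int × Int × List (Int × Int × Int)))
    (n m : Nat) (l : List (Int × Int × Int)) :
    ∀ (w : PySem.Set (Int × Int × Int)), pvUnvisited pred w < n → pvUnvisited pred w < m →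
      l.foldl (fun acc p => pvVisitF pred n p acc) w = l.foldl (fun acc p => pvVisitF pred m p acc) w := by
  induction l with
  | nil => intro w _ _; rfl
  | cons p l ih =>
    intro w hn hm
    simp only [List.foldl_cons]
    rw [pvVisitF_fuel pred n m p w hn hm]
    have hle : pvUnvisited pred (pvVisitF pred m p w) ≤ pvUnvisited pred w :=
      pvUnvisited_mono pred (pvVisitF_mono pred m p w)
    exact ih (pvVisitF pred m p w) (by omega) (by omega)

-- elements already known visited (⊆ every accumulator) may be filtered out of a visit sequence
theorem pvSeq_filter (pred : List (Int × Int × Int × List (Int × Int × Int)))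
    (n : Nat) (hn : 0 < n) (v₀ : List (Int × Int × Int)) (l : List (Int × Int × Int)) :
    ∀ (w : PySem.Set (Int × Int × Int)), (∀ x, x ∈ v₀ → x ∈ w) →
      (l.filter (fun p => decide (¬ p ∈ v₀))).foldl (fun acc p => pvVisitF pred n p acc) w
        = l.foldl (fun acc p => pvVisitF pred n p acc) w := by
  induction l with
  | nil => intro w _; rfl
  | cons p l ih =>
    intro w hw
    by_cases hp : p ∈ v₀
    · rw [List.filter_cons_of_neg (by simpa using hp)]
      simp only [List.foldl_cons]
      rw [pvVisitF_skip pred hn (hw p hp)]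
      exact ih w hw
    · rw [List.filter_cons_of_pos (by simpa using hp)]
      simp only [List.foldl_cons]
      exact ih _ (fun x hx => pvVisitF_mono pred n p w x (hw x hx))

-- A's worklist loop computes exactly the sequential recursive visits (with adequate fuel)
theorem pvLoopA_eq_seq (pred : List (Int × Int × Int × List (Int × Int × Int)))
    (visited : PySem.Set (Int × Int × Int)) (stack : List (Int × Int × Int)) :
    ∀ (n : Nat), pvUnvisited pred visited < n →
      pvLoopA pred visited stack = stack.foldl (fun acc s => pvVisitF pred n s acc) visited := by
  induction visited, stack using pvLoopA.induct pred with
  | case1 v => intro n _; rw [pvLoopA]; rfl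
  | case2 v s rest h ih =>
    intro n hn
    rw [pvLoopA]; simp only [h, dite_true]
    rw [ih n hn]
    simp only [List.foldl_cons]
    rw [pvVisitF_skip pred (by omega) h]
  | case3 v s rest h ih =>
    intro n hn
    rw [pvLoopA]; simp only [h, dite_false]
    have hadd : pvUnvisited pred (PySem.Set.add v s) ≤ pvUnvisited pred v :=
      pvUnvisited_mono pred (fun x hx => (PySem.Set.mem_add _ _ _).mpr (Or.inl hx))
    rw [ih n (by omega), List.foldl_append]
    simp only [List.foldl_cons]
    cases n with
    | zero => omega
    | succ m =>
      rw [pvVisitF]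
      simp only [h, if_false]
      congr 1
      rw [← List.filter_reverse, ← pvGetPredsB_eq_A,
        pvSeq_filter pred (Nat.succ m) (Nat.succ_pos m) (PySem.Set.add v s)
          ((pvGetPredsB pred s).reverse) (PySem.Set.add v s) (fun x hx => hx)]
      by_cases hk : s ∈ pvKeys pred
      · have hlt : pvUnvisited pred (PySem.Set.add v s) < pvUnvisited pred v :=
          pvUnvisited_add_lt pred hk h
        exact pvSeq_fuel pred (Nat.succ m) m _ (PySem.Set.add v s) (by omega) (by omega)
      · rw [pvGetPredsB_eq_A, pvGetPredsA_eq_nil pred hk]; rfl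

theorem pvUnvisited_le (pred : List (Int × Int × Int × List (Int × Int × Int)))
    (v : List (Int × Int × Int)) : pvUnvisited pred v ≤ pred.length := by
  calc pvUnvisited pred v ≤ (pvKeys pred).length := List.countP_le_length
    _ = pred.length := List.length_map ..

-- ===== VERDICT (by name: the statement is the Claim_ definition above) =====
theorem collect_optimal_tiles_spec : Claim_equal_collect_optimal_tiles := by
  intro pred goal_states _
  unfold Spec_collect_optimal_tiles collect_optimal_tiles collect_optimal_tiles_alt
  rw [pvLoopA_eq_seq pred PySem.Set.empty goal_states.reverse (pred.length + 1)
    (by have := pvUnvisited_le pred PySem.Set.empty; omega)]
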